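-- pv_equiv track=rewrite | github.com/EridosAI/Bernard | src/continuous_listening.py | extract_object_name
-- ===== SOURCE A (Python) =====
-- from typing import Optional, Tuple
--
-- def extract_object_name(transcript: str) -> Optional[str]:
--     """
--     Extract object name from TEACH intent.
--
--     Examples:
--         "this is called a multimeter" -> "multimeter"
--         "this is a Phillips head" -> "Phillips head"
--         "that's a soldering iron" -> "soldering iron"
--     """
--     transcript = transcript.lower().strip()
--
--     # Ordered by specificity (longer prefixes first)
--     prefixes = [
--         "this is called a ",
--         "this is called an ",
--         "this is called ",
--         "that is called a ",
--         "that is called an ",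
--         "that is called ",
--         "it's called a ",
--         "it's called an ",
--         "it's called ",
--         "this is a ",
--         "this is an ",
--         "this is my ",
--         "this is ",
--         "that's a ",
--         "that's an ",
--         "that's my ",
--         "that's ",
--         "that is a ",
--         "that is an ",
--         "that is ",
--         "it's a ",
--         "it's an ",
--         "it's my ",
--         "it's ",
--     ]
--
--     # Non-object words/phrases that should not be extracted as object names
--     non_objects = {
--         "impossible", "correct", "right", "wrong", "good", "bad", "great",
--         "nice", "fine", "okay", "ok", "true", "false", "working", "broken",
--         "amazing", "terrible", "perfect", "weird", "strange", "interesting",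
--         "cool", "awesome", "fantastic", "horrible", "ridiculous", "stupid",
--     }
--
--     for prefix in prefixes:
--         if transcript.startswith(prefix):
--             name = transcript[len(prefix):].strip()
--             # Clean trailing punctuation
--             name = name.rstrip('.,!?')
--
--             # Reject non-object words
--             if name in non_objects:
--                 return None
--
--             # Reject negations (e.g., "not a hammer")
--             if name.startswith("not "):
--                 return None
--
--             return name if len(name) >= 2 else None
--
--     return None
-- ===== SOURCE B (Python) =====
-- # B: factored control flow -- dispatch once on one of four mutually exclusive
-- # subject heads, then per-subject determiner tests; no prefix table at all.
-- _NON_OBJECTS = frozenset(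
--     "impossible correct right wrong good bad great nice fine okay ok true false "
--     "working broken amazing terrible perfect weird strange interesting cool "
--     "awesome fantastic horrible ridiculous stupid".split())
--
--
-- def _clean(rest):
--     name = rest.strip().rstrip('.,!?')
--     if name in _NON_OBJECTS or name.startswith("not ") or len(name) < 2:
--         return None
--     return name
--
--
-- def _after_head(rest, with_my):
--     # rest follows a subject head; peel the optional "called"/determiner part
--     if rest.startswith("called a "):
--         return _clean(rest[9:])
--     if rest.startswith("called an "):
--         return _clean(rest[10:])
--     if rest.startswith("called "):
--         return _clean(rest[7:])
--     if rest.startswith("a "):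
--         return _clean(rest[2:])
--     if rest.startswith("an "):
--         return _clean(rest[3:])
--     if with_my and rest.startswith("my "):
--         return _clean(rest[3:])
--     return _clean(rest)
--
--
-- def extract_object_name(transcript):
--     t = transcript.lower().strip()
--     if t.startswith("this is "):
--         return _after_head(t[8:], True)
--     if t.startswith("that is "):
--         return _after_head(t[8:], False)
--     if t.startswith("that's "):
--         # "that's" takes no "called" forms in the original grammar
--         r = t[7:]
--         if r.startswith("a "):
--             return _clean(r[2:])
--         if r.startswith("an "):
--             return _clean(r[3:])
--         if r.startswith("my "):
--             return _clean(r[3:])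
--         return _clean(r)
--     if t.startswith("it's "):
--         return _after_head(t[5:], True)
--     return None
-- ===== Notes on version B (the rewrite author's own statement) =====
-- stated objective: alternative
-- what changed: Replaces A's data-driven first-match scan over a 24-element prefix table by factored control flow: one dispatch on four mutually exclusive subject heads ('this is ', 'that is ', "that's ", "it's "), then per-subject determiner tests on the remainder; the prefix table disappears, and the non-object words and rstrip are maintained differently (frozenset of a split literal; right-fold rstrip).
import Mathlib
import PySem

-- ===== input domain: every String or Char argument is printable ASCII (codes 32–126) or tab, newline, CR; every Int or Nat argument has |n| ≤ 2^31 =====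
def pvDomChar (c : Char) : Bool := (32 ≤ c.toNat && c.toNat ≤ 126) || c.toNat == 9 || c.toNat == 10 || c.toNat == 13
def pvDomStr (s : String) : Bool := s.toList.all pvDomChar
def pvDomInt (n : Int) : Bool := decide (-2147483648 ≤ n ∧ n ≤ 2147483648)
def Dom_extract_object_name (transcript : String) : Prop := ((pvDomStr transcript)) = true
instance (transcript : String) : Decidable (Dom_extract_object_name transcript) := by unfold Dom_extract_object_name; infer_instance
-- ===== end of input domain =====

-- B replaces A's data-driven first-match scan over 24 prefixes by factored control flow
-- (one dispatch on four mutually exclusive subject heads, then per-subject determiner tests);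
-- objective: alternative decomposition, same observable behaviour (A = B everywhere).

-- ===== PORT A =====
-- A's set literal of non-object words
def pvNonObjects : PySem.Set (List Char) := PySem.Set.ofList
  ["impossible".toList, "correct".toList, "right".toList, "wrong".toList, "good".toList,
   "bad".toList, "great".toList, "nice".toList, "fine".toList, "okay".toList, "ok".toList,
   "true".toList, "false".toList, "working".toList, "broken".toList, "amazing".toList,
   "terrible".toList, "perfect".toList, "weird".toList, "strange".toList, "interesting".toList,
   "cool".toList, "awesome".toList, "fantastic".toList, "horrible".toList, "ridiculous".toList,
   "stupid".toList]

-- exact hand port of str.rstrip('.,!?') (PySem has no rstrip-with-chars): drop trailing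
-- characters that are in `chars`
def pvRstrip (s chars : List Char) : List Char :=
  (List.dropWhile (fun c => chars.contains c) s.reverse).reverse

def pvFinishA (t p : List Char) : Option String :=
  let name0 := PySem.Chars.strip (PySem.List.slice t (some (PySem.Chars.len p)) none)
  let name := pvRstrip name0 ".,!?".toList
  if PySem.Set.contains pvNonObjects name then none
  else if PySem.Chars.startswith name "not ".toList then none
  else if 2 ≤ PySem.Chars.len name then some (String.ofList name) else none

def pvPrefixes : List (List Char) :=
  ["this is called a ".toList, "this is called an ".toList, "this is called ".toList,
   "that is called a ".toList, "that is called an ".toList, "that is called ".toList,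
   "it's called a ".toList, "it's called an ".toList, "it's called ".toList,
   "this is a ".toList, "this is an ".toList, "this is my ".toList, "this is ".toList,
   "that's a ".toList, "that's an ".toList, "that's my ".toList, "that's ".toList,
   "that is a ".toList, "that is an ".toList, "that is ".toList,
   "it's a ".toList, "it's an ".toList, "it's my ".toList, "it's ".toList]

def pvLoopA (t : List Char) : List (List Char) → Option String
  | [] => none
  | p :: ps => if PySem.Chars.startswith t p then pvFinishA t p else pvLoopA t ps

def extract_object_name (transcript : String) : Option String :=
  pvLoopA (PySem.Chars.strip (PySem.Chars.lower transcript.toList)) pvPrefixes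

-- ===== PORT B =====
-- B's non-object words: frozenset("… …".split())
def pvNonObjB : PySem.Set (List Char) := PySem.Set.ofList (PySem.Chars.split₀
  ("impossible correct right wrong good bad great nice fine okay ok true false " ++
   "working broken amazing terrible perfect weird strange interesting cool " ++
   "awesome fantastic horrible ridiculous stupid").toList)

-- B's hand port of str.rstrip('.,!?'): a structural right-fold over the string
def pvRstripB : List Char → List Char
  | [] => []
  | c :: cs =>
      match pvRstripB cs with
      | [] => if ".,!?".toList.contains c then [] else [c]
      | r => c :: r

-- _clean: strip, rstrip punctuation, one combined rejection test
def pvCleanB (rest : List Char) : Option String :=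
  let name := pvRstripB (PySem.Chars.strip rest)
  if PySem.Set.contains pvNonObjB name || PySem.Chars.startswith name "not ".toList
      || PySem.Chars.len name < 2 then none
  else some (String.ofList name)

-- _after_head: peel the optional "called"/determiner part after a subject head
def pvAfterHead (rest : List Char) (withMy : Bool) : Option String :=
  if PySem.Chars.startswith rest "called a ".toList then pvCleanB (PySem.List.slice rest (some 9) none)
  else if PySem.Chars.startswith rest "called an ".toList then pvCleanB (PySem.List.slice rest (some 10) none)
  else if PySem.Chars.startswith rest "called ".toList then pvCleanB (PySem.List.slice rest (some 7) none)
  else if PySem.Chars.startswith rest "a ".toList then pvCleanB (PySem.List.slice rest (some 2) none)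
  else if PySem.Chars.startswith rest "an ".toList then pvCleanB (PySem.List.slice rest (some 3) none)
  else if withMy && PySem.Chars.startswith rest "my ".toList then pvCleanB (PySem.List.slice rest (some 3) none)
  else pvCleanB rest

def extract_object_name_alt (transcript : String) : Option String :=
  let t := PySem.Chars.strip (PySem.Chars.lower transcript.toList)
  if PySem.Chars.startswith t "this is ".toList then pvAfterHead (PySem.List.slice t (some 8) none) true
  else if PySem.Chars.startswith t "that is ".toList then pvAfterHead (PySem.List.slice t (some 8) none) false
  else if PySem.Chars.startswith t "that's ".toList then
    let r := PySem.List.slice t (some 7) none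
    if PySem.Chars.startswith r "a ".toList then pvCleanB (PySem.List.slice r (some 2) none)
    else if PySem.Chars.startswith r "an ".toList then pvCleanB (PySem.List.slice r (some 3) none)
    else if PySem.Chars.startswith r "my ".toList then pvCleanB (PySem.List.slice r (some 3) none)
    else pvCleanB r
  else if PySem.Chars.startswith t "it's ".toList then pvAfterHead (PySem.List.slice t (some 5) none) true
  else none

-- ===== PRECONDITION & SPEC =====
def Spec_extract_object_name (transcript : String) (out : Option String) : Prop := out = extract_object_name_alt transcript
instance (transcript : String) (out : Option String) : Decidable (Spec_extract_object_name transcript out) := by unfold Spec_extract_object_name; infer_instance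

-- ===== CLAIM (what is proved, stated in full; the proofs are below) =====
def Claim_equal_extract_object_name : Prop := ∀ (transcript : String), Dom_extract_object_name transcript → Spec_extract_object_name transcript (extract_object_name transcript)

-- ===== LEMMAS AND PROOFS =====

lemma pv_sw_append (t p q : List Char) :
    PySem.Chars.startswith t (p ++ q)
      = (PySem.Chars.startswith t p && PySem.Chars.startswith (t.drop p.length) q) := by
  have key : (p ++ q <+: t) ↔ (p <+: t ∧ q <+: List.drop p.length t) := by
    constructor
    · rintro ⟨r, rfl⟩
      rw [List.append_assoc]
      exact ⟨List.prefix_append _ _, by rw [List.drop_left]; exact List.prefix_append _ _⟩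
    · rintro ⟨⟨t2, rfl⟩, hq⟩
      rw [List.drop_left] at hq
      obtain ⟨r, rfl⟩ := hq
      rw [← List.append_assoc]
      exact List.prefix_append _ _
  rcases h : PySem.Chars.startswith t p with _ | _
  · simp only [Bool.false_and]
    rw [← Bool.not_eq_true]
    simp only [PySem.Chars.startswith_iff, key]
    rintro ⟨hp, -⟩
    rw [← Bool.not_eq_true, PySem.Chars.startswith_iff] at h
    exact h hp
  · simp only [Bool.true_and]
    rw [PySem.Chars.startswith_iff] at h
    rcases h2 : PySem.Chars.startswith (t.drop p.length) q with _ | _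
    · rw [← Bool.not_eq_true]
      simp only [PySem.Chars.startswith_iff, key]
      rintro ⟨-, hq⟩
      rw [← Bool.not_eq_true, PySem.Chars.startswith_iff] at h2
      exact h2 hq
    · rw [PySem.Chars.startswith_iff] at h2 ⊢
      exact key.mpr ⟨h, h2⟩

-- the four subjects are pairwise incomparable, so a string starts with at most one of them
lemma pv_excl {t x : List Char} (y : List Char)
    (hx : PySem.Chars.startswith t x = true)
    (hxy : ¬ x <+: y) (hyx : ¬ y <+: x) :
    PySem.Chars.startswith t y = false := by
  rw [← Bool.not_eq_true, PySem.Chars.startswith_iff]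
  intro hy
  rw [PySem.Chars.startswith_iff] at hx
  rcases List.prefix_or_prefix_of_prefix hx hy with h | h
  · exact hxy h
  · exact hyx h

-- B's right-fold rstrip computes A's reverse/dropWhile/reverse rstrip
lemma pvRstripB_eq : ∀ s : List Char, pvRstripB s = pvRstrip s ".,!?".toList := by
  intro s
  induction s with
  | nil => rfl
  | cons c cs ih =>
    simp only [pvRstripB, ih, pvRstrip, List.reverse_cons, List.dropWhile_append]
    rcases h : List.dropWhile (fun c => ".,!?".toList.contains c) cs.reverse with _ | ⟨d, ds⟩
    · simp only [List.isEmpty_nil, if_true, List.dropWhile, List.reverse_nil]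
      rcases hb : (".,!?".toList.contains c) with _ | _
      · simp
      · simp
    · simp

lemma pv_sl2 (s : List Char) : PySem.List.slice s (some 2) none = s.drop 2 := by
  simpa using PySem.List.slice_from_natCast s 2
lemma pv_sl3 (s : List Char) : PySem.List.slice s (some 3) none = s.drop 3 := by
  simpa using PySem.List.slice_from_natCast s 3
lemma pv_sl5 (s : List Char) : PySem.List.slice s (some 5) none = s.drop 5 := by
  simpa using PySem.List.slice_from_natCast s 5
lemma pv_sl7 (s : List Char) : PySem.List.slice s (some 7) none = s.drop 7 := by
  simpa using PySem.List.slice_from_natCast s 7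
lemma pv_sl8 (s : List Char) : PySem.List.slice s (some 8) none = s.drop 8 := by
  simpa using PySem.List.slice_from_natCast s 8
lemma pv_sl9 (s : List Char) : PySem.List.slice s (some 9) none = s.drop 9 := by
  simpa using PySem.List.slice_from_natCast s 9
lemma pv_sl10 (s : List Char) : PySem.List.slice s (some 10) none = s.drop 10 := by
  simpa using PySem.List.slice_from_natCast s 10

-- A's post-processing after a matched prefix equals B's _clean of the same remainder
set_option maxRecDepth 4000 in
lemma pvFinishA_eq (t p : List Char) :
    pvFinishA t p = pvCleanB (List.drop p.length t) := by
  have hEq : pvNonObjB = pvNonObjects := by rfl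
  simp only [pvFinishA, pvCleanB, PySem.Chars.len_eq, PySem.List.slice_from_natCast,
    pvRstripB_eq, hEq]
  generalize pvRstrip (PySem.Chars.strip (List.drop p.length t)) ".,!?".toList = name
  rcases hA : PySem.Set.contains pvNonObjects name with _ | _
  · rcases hB : PySem.Chars.startswith name "not ".toList with _ | _
    · simp only [Bool.false_eq_true, if_false]
      by_cases hl : ((name.length : Int) < 2)
      · rw [if_neg (by omega), if_pos (by simpa using hl)]
      · rw [if_pos (by omega), if_neg (by simpa using hl)]
    · simp
  · simp

lemma pvSW1 (t : List Char) :
    PySem.Chars.startswith t "this is called a ".toList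
      = (PySem.Chars.startswith t "this is ".toList &&
         PySem.Chars.startswith (t.drop 8) "called a ".toList) := by
  rw [show "this is called a ".toList = "this is ".toList ++ "called a ".toList from by decide,
     pv_sw_append, show "this is ".toList.length = 8 from by decide]

lemma pvSW2 (t : List Char) :
    PySem.Chars.startswith t "this is called an ".toList
      = (PySem.Chars.startswith t "this is ".toList &&
         PySem.Chars.startswith (t.drop 8) "called an ".toList) := by
  rw [show "this is called an ".toList = "this is ".toList ++ "called an ".toList from by decide,
     pv_sw_append, show "this is ".toList.length = 8 from by decide]

lemma pvSW3 (t : List Char) :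
    PySem.Chars.startswith t "this is called ".toList
      = (PySem.Chars.startswith t "this is ".toList &&
         PySem.Chars.startswith (t.drop 8) "called ".toList) := by
  rw [show "this is called ".toList = "this is ".toList ++ "called ".toList from by decide,
     pv_sw_append, show "this is ".toList.length = 8 from by decide]

lemma pvSW4 (t : List Char) :
    PySem.Chars.startswith t "that is called a ".toList
      = (PySem.Chars.startswith t "that is ".toList &&
         PySem.Chars.startswith (t.drop 8) "called a ".toList) := by
  rw [show "that is called a ".toList = "that is ".toList ++ "called a ".toList from by decide,
     pv_sw_append, show "that is ".toList.length = 8 from by decide]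

lemma pvSW5 (t : List Char) :
    PySem.Chars.startswith t "that is called an ".toList
      = (PySem.Chars.startswith t "that is ".toList &&
         PySem.Chars.startswith (t.drop 8) "called an ".toList) := by
  rw [show "that is called an ".toList = "that is ".toList ++ "called an ".toList from by decide,
     pv_sw_append, show "that is ".toList.length = 8 from by decide]

lemma pvSW6 (t : List Char) :
    PySem.Chars.startswith t "that is called ".toList
      = (PySem.Chars.startswith t "that is ".toList &&
         PySem.Chars.startswith (t.drop 8) "called ".toList) := by
  rw [show "that is called ".toList = "that is ".toList ++ "called ".toList from by decide,
     pv_sw_append, show "that is ".toList.length = 8 from by decide]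

lemma pvSW7 (t : List Char) :
    PySem.Chars.startswith t "it's called a ".toList
      = (PySem.Chars.startswith t "it's ".toList &&
         PySem.Chars.startswith (t.drop 5) "called a ".toList) := by
  rw [show "it's called a ".toList = "it's ".toList ++ "called a ".toList from by decide,
     pv_sw_append, show "it's ".toList.length = 5 from by decide]

lemma pvSW8 (t : List Char) :
    PySem.Chars.startswith t "it's called an ".toList
      = (PySem.Chars.startswith t "it's ".toList &&
         PySem.Chars.startswith (t.drop 5) "called an ".toList) := by
  rw [show "it's called an ".toList = "it's ".toList ++ "called an ".toList from by decide,
     pv_sw_append, show "it's ".toList.length = 5 from by decide]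

lemma pvSW9 (t : List Char) :
    PySem.Chars.startswith t "it's called ".toList
      = (PySem.Chars.startswith t "it's ".toList &&
         PySem.Chars.startswith (t.drop 5) "called ".toList) := by
  rw [show "it's called ".toList = "it's ".toList ++ "called ".toList from by decide,
     pv_sw_append, show "it's ".toList.length = 5 from by decide]

lemma pvSW10 (t : List Char) :
    PySem.Chars.startswith t "this is a ".toList
      = (PySem.Chars.startswith t "this is ".toList &&
         PySem.Chars.startswith (t.drop 8) "a ".toList) := by
  rw [show "this is a ".toList = "this is ".toList ++ "a ".toList from by decide,
     pv_sw_append, show "this is ".toList.length = 8 from by decide]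

lemma pvSW11 (t : List Char) :
    PySem.Chars.startswith t "this is an ".toList
      = (PySem.Chars.startswith t "this is ".toList &&
         PySem.Chars.startswith (t.drop 8) "an ".toList) := by
  rw [show "this is an ".toList = "this is ".toList ++ "an ".toList from by decide,
     pv_sw_append, show "this is ".toList.length = 8 from by decide]

lemma pvSW12 (t : List Char) :
    PySem.Chars.startswith t "this is my ".toList
      = (PySem.Chars.startswith t "this is ".toList &&
         PySem.Chars.startswith (t.drop 8) "my ".toList) := by
  rw [show "this is my ".toList = "this is ".toList ++ "my ".toList from by decide,
     pv_sw_append, show "this is ".toList.length = 8 from by decide]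

lemma pvSW13 (t : List Char) :
    PySem.Chars.startswith t "that's a ".toList
      = (PySem.Chars.startswith t "that's ".toList &&
         PySem.Chars.startswith (t.drop 7) "a ".toList) := by
  rw [show "that's a ".toList = "that's ".toList ++ "a ".toList from by decide,
     pv_sw_append, show "that's ".toList.length = 7 from by decide]

lemma pvSW14 (t : List Char) :
    PySem.Chars.startswith t "that's an ".toList
      = (PySem.Chars.startswith t "that's ".toList &&
         PySem.Chars.startswith (t.drop 7) "an ".toList) := by
  rw [show "that's an ".toList = "that's ".toList ++ "an ".toList from by decide,
     pv_sw_append, show "that's ".toList.length = 7 from by decide]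

lemma pvSW15 (t : List Char) :
    PySem.Chars.startswith t "that's my ".toList
      = (PySem.Chars.startswith t "that's ".toList &&
         PySem.Chars.startswith (t.drop 7) "my ".toList) := by
  rw [show "that's my ".toList = "that's ".toList ++ "my ".toList from by decide,
     pv_sw_append, show "that's ".toList.length = 7 from by decide]

lemma pvSW16 (t : List Char) :
    PySem.Chars.startswith t "that is a ".toList
      = (PySem.Chars.startswith t "that is ".toList &&
         PySem.Chars.startswith (t.drop 8) "a ".toList) := by
  rw [show "that is a ".toList = "that is ".toList ++ "a ".toList from by decide,
     pv_sw_append, show "that is ".toList.length = 8 from by decide]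

lemma pvSW17 (t : List Char) :
    PySem.Chars.startswith t "that is an ".toList
      = (PySem.Chars.startswith t "that is ".toList &&
         PySem.Chars.startswith (t.drop 8) "an ".toList) := by
  rw [show "that is an ".toList = "that is ".toList ++ "an ".toList from by decide,
     pv_sw_append, show "that is ".toList.length = 8 from by decide]

lemma pvSW18 (t : List Char) :
    PySem.Chars.startswith t "it's a ".toList
      = (PySem.Chars.startswith t "it's ".toList &&
         PySem.Chars.startswith (t.drop 5) "a ".toList) := by
  rw [show "it's a ".toList = "it's ".toList ++ "a ".toList from by decide,
     pv_sw_append, show "it's ".toList.length = 5 from by decide]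

lemma pvSW19 (t : List Char) :
    PySem.Chars.startswith t "it's an ".toList
      = (PySem.Chars.startswith t "it's ".toList &&
         PySem.Chars.startswith (t.drop 5) "an ".toList) := by
  rw [show "it's an ".toList = "it's ".toList ++ "an ".toList from by decide,
     pv_sw_append, show "it's ".toList.length = 5 from by decide]

lemma pvSW20 (t : List Char) :
    PySem.Chars.startswith t "it's my ".toList
      = (PySem.Chars.startswith t "it's ".toList &&
         PySem.Chars.startswith (t.drop 5) "my ".toList) := by
  rw [show "it's my ".toList = "it's ".toList ++ "my ".toList from by decide,
     pv_sw_append, show "it's ".toList.length = 5 from by decide]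

lemma pvL1 : "this is called a ".toList.length = 17 := by decide
lemma pvL2 : "this is called an ".toList.length = 18 := by decide
lemma pvL3 : "this is called ".toList.length = 15 := by decide
lemma pvL4 : "that is called a ".toList.length = 17 := by decide
lemma pvL5 : "that is called an ".toList.length = 18 := by decide
lemma pvL6 : "that is called ".toList.length = 15 := by decide
lemma pvL7 : "it's called a ".toList.length = 14 := by decide
lemma pvL8 : "it's called an ".toList.length = 15 := by decide
lemma pvL9 : "it's called ".toList.length = 12 := by decide
lemma pvL10 : "this is a ".toList.length = 10 := by decide
lemma pvL11 : "this is an ".toList.length = 11 := by decide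
lemma pvL12 : "this is my ".toList.length = 11 := by decide
lemma pvL13 : "this is ".toList.length = 8 := by decide
lemma pvL14 : "that's a ".toList.length = 9 := by decide
lemma pvL15 : "that's an ".toList.length = 10 := by decide
lemma pvL16 : "that's my ".toList.length = 10 := by decide
lemma pvL17 : "that's ".toList.length = 7 := by decide
lemma pvL18 : "that is a ".toList.length = 10 := by decide
lemma pvL19 : "that is an ".toList.length = 11 := by decide
lemma pvL20 : "that is ".toList.length = 8 := by decide
lemma pvL21 : "it's a ".toList.length = 7 := by decide
lemma pvL22 : "it's an ".toList.length = 8 := by decide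
lemma pvL23 : "it's my ".toList.length = 8 := by decide
lemma pvL24 : "it's ".toList.length = 5 := by decide

-- ===== VERDICT (by name: the statement is the Claim_ definition above) =====
theorem extract_object_name_spec : Claim_equal_extract_object_name := by
  unfold Claim_equal_extract_object_name Spec_extract_object_name
  intro transcript _
  unfold extract_object_name extract_object_name_alt
  generalize (PySem.Chars.strip (PySem.Chars.lower transcript.toList)) = t
  rcases h1 : PySem.Chars.startswith t "this is ".toList with _ | _
  case false =>
    rcases h2 : PySem.Chars.startswith t "that is ".toList with _ | _
    case false =>
      rcases h3 : PySem.Chars.startswith t "that's ".toList with _ | _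
      case false =>
        rcases h4 : PySem.Chars.startswith t "it's ".toList with _ | _
        case false =>
          simp only [pvLoopA, pvPrefixes, pvAfterHead, pvFinishA_eq, pvSW1, pvSW2, pvSW3, pvSW4, pvSW5, pvSW6, pvSW7, pvSW8, pvSW9, pvSW10, pvSW11, pvSW12, pvSW13, pvSW14, pvSW15, pvSW16, pvSW17, pvSW18, pvSW19, pvSW20, pvL1, pvL2, pvL3, pvL4, pvL5, pvL6, pvL7, pvL8, pvL9, pvL10, pvL11, pvL12, pvL13, pvL14, pvL15, pvL16, pvL17, pvL18, pvL19, pvL20, pvL21, pvL22, pvL23, pvL24, pv_sl2, pv_sl3, pv_sl5, pv_sl7, pv_sl8, pv_sl9, pv_sl10, List.drop_drop, Bool.false_and, Bool.true_and, Bool.false_eq_true, Bool.false_or, if_false, if_true, h1, h2, h3, h4]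
        case true =>
          simp only [pvLoopA, pvPrefixes, pvAfterHead, pvFinishA_eq, pvSW1, pvSW2, pvSW3, pvSW4, pvSW5, pvSW6, pvSW7, pvSW8, pvSW9, pvSW10, pvSW11, pvSW12, pvSW13, pvSW14, pvSW15, pvSW16, pvSW17, pvSW18, pvSW19, pvSW20, pvL1, pvL2, pvL3, pvL4, pvL5, pvL6, pvL7, pvL8, pvL9, pvL10, pvL11, pvL12, pvL13, pvL14, pvL15, pvL16, pvL17, pvL18, pvL19, pvL20, pvL21, pvL22, pvL23, pvL24, pv_sl2, pv_sl3, pv_sl5, pv_sl7, pv_sl8, pv_sl9, pv_sl10, List.drop_drop, Bool.false_and, Bool.true_and, Bool.false_eq_true, Bool.false_or, if_false, if_true, h1, h2, h3, h4]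
      case true =>
        have h4 := pv_excl (t := t) "it's ".toList h3 (by decide) (by decide)
        simp only [pvLoopA, pvPrefixes, pvAfterHead, pvFinishA_eq, pvSW1, pvSW2, pvSW3, pvSW4, pvSW5, pvSW6, pvSW7, pvSW8, pvSW9, pvSW10, pvSW11, pvSW12, pvSW13, pvSW14, pvSW15, pvSW16, pvSW17, pvSW18, pvSW19, pvSW20, pvL1, pvL2, pvL3, pvL4, pvL5, pvL6, pvL7, pvL8, pvL9, pvL10, pvL11, pvL12, pvL13, pvL14, pvL15, pvL16, pvL17, pvL18, pvL19, pvL20, pvL21, pvL22, pvL23, pvL24, pv_sl2, pv_sl3, pv_sl5, pv_sl7, pv_sl8, pv_sl9, pv_sl10, List.drop_drop, Bool.false_and, Bool.true_and, Bool.false_eq_true, Bool.false_or, if_false, if_true, h1, h2, h3, h4]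
    case true =>
      have h3 := pv_excl (t := t) "that's ".toList h2 (by decide) (by decide)
      have h4 := pv_excl (t := t) "it's ".toList h2 (by decide) (by decide)
      simp only [pvLoopA, pvPrefixes, pvAfterHead, pvFinishA_eq, pvSW1, pvSW2, pvSW3, pvSW4, pvSW5, pvSW6, pvSW7, pvSW8, pvSW9, pvSW10, pvSW11, pvSW12, pvSW13, pvSW14, pvSW15, pvSW16, pvSW17, pvSW18, pvSW19, pvSW20, pvL1, pvL2, pvL3, pvL4, pvL5, pvL6, pvL7, pvL8, pvL9, pvL10, pvL11, pvL12, pvL13, pvL14, pvL15, pvL16, pvL17, pvL18, pvL19, pvL20, pvL21, pvL22, pvL23, pvL24, pv_sl2, pv_sl3, pv_sl5, pv_sl7, pv_sl8, pv_sl9, pv_sl10, List.drop_drop, Bool.false_and, Bool.true_and, Bool.false_eq_true, Bool.false_or, if_false, if_true, h1, h2, h3, h4]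
  case true =>
    have h2 := pv_excl (t := t) "that is ".toList h1 (by decide) (by decide)
    have h3 := pv_excl (t := t) "that's ".toList h1 (by decide) (by decide)
    have h4 := pv_excl (t := t) "it's ".toList h1 (by decide) (by decide)
    simp only [pvLoopA, pvPrefixes, pvAfterHead, pvFinishA_eq, pvSW1, pvSW2, pvSW3, pvSW4, pvSW5, pvSW6, pvSW7, pvSW8, pvSW9, pvSW10, pvSW11, pvSW12, pvSW13, pvSW14, pvSW15, pvSW16, pvSW17, pvSW18, pvSW19, pvSW20, pvL1, pvL2, pvL3, pvL4, pvL5, pvL6, pvL7, pvL8, pvL9, pvL10, pvL11, pvL12, pvL13, pvL14, pvL15, pvL16, pvL17, pvL18, pvL19, pvL20, pvL21, pvL22, pvL23, pvL24, pv_sl2, pv_sl3, pv_sl5, pv_sl7, pv_sl8, pv_sl9, pv_sl10, List.drop_drop, Bool.false_and, Bool.true_and, Bool.false_eq_true, Bool.false_or, if_false, if_true, h1, h2, h3, h4]
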